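-- pv_equiv track=rewrite | github.com/davidcctcrc-tao/malpip-gpt | malpip_app.py | match_malpip
-- ===== SOURCE A (Python) =====
-- def match_malpip(case_text, rules):
--     matched = []
--     text_lower = case_text.lower()
--     for r in rules:
--         drug_class = str(r.get("drug_class", "")).lower()
--         example_drugs = str(r.get("example_drugs", "")).lower()
--         if drug_class in text_lower or any(d.strip() in text_lower for d in example_drugs.split(",")):
--             matched.append(r)
--     return matched
-- ===== SOURCE B (Python) =====
-- def match_malpip(case_text, rules):
--     text_lower = case_text.lower()
--
--     def patterns(r):
--         ps = [str(r.get("drug_class", "")).lower()]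
--         ps.extend(d.strip() for d in str(r.get("example_drugs", "")).lower().split(","))
--         return ps
--
--     seen = set()
--     found = set()
--     for r in rules:
--         for p in patterns(r):
--             if p not in seen:
--                 seen.add(p)
--                 if p in text_lower:
--                     found.add(p)
--     return [r for r in rules if any(p in found for p in patterns(r))]
-- ===== Notes on version B (the rewrite author's own statement) =====
-- stated objective: alternative
-- what changed: Instead of testing every rule's patterns against the text independently, B collects the distinct patterns in one de-duplicating pass, tests each distinct pattern against the text exactly once into a 'found' set, and then filters the rules by set membership.
import Mathlib
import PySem

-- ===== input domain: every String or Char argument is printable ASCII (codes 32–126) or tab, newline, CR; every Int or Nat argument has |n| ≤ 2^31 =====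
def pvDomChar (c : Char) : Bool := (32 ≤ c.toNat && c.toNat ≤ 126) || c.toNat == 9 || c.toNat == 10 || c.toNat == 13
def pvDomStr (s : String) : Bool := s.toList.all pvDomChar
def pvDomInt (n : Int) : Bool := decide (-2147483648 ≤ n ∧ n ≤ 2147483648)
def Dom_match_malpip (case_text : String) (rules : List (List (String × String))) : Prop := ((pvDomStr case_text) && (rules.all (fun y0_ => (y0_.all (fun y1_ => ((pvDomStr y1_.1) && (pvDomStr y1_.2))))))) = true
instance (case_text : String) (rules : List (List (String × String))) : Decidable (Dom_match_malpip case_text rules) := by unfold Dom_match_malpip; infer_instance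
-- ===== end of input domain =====

-- B replaces A's per-rule substring tests by a single de-duplicating pass that tests each
-- DISTINCT pattern against the text once, then filters rules by set membership (objective: alternative).

-- ===== PORT A =====
def match_malpip (case_text : String) (rules : List (List (String × String))) : List (List (String × String)) :=
  let text_lower := PySem.Str.lower case_text
  rules.foldl (fun matched r =>
    let drug_class := PySem.Str.lower (PySem.Dict.getD (PySem.Dict.mk r) "drug_class" "")
    let example_drugs := PySem.Str.lower (PySem.Dict.getD (PySem.Dict.mk r) "example_drugs" "")
    if PySem.Str.isIn drug_class text_lower ||
       ((PySem.Str.split? example_drugs ",").getD []).any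
         (fun d => PySem.Str.isIn (PySem.Str.strip d) text_lower)
    then matched ++ [r] else matched) []

-- ===== PORT B =====
-- B's helper `patterns(r)`: the drug_class pattern followed by the stripped example_drugs parts
def mmPatterns (r : List (String × String)) : List String :=
  PySem.Str.lower (PySem.Dict.getD (PySem.Dict.mk r) "drug_class" "") ::
  ((PySem.Str.split? (PySem.Str.lower (PySem.Dict.getD (PySem.Dict.mk r) "example_drugs" "")) ",").getD []).map
    PySem.Str.strip

-- B's inner loop body on the state (seen, found)
def mmStep (text_lower : String) (sf : PySem.Set String × PySem.Set String) (p : String) :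
    PySem.Set String × PySem.Set String :=
  if PySem.Set.contains sf.1 p then sf
  else (PySem.Set.add sf.1 p,
        if PySem.Str.isIn p text_lower then PySem.Set.add sf.2 p else sf.2)

def match_malpip_alt (case_text : String) (rules : List (List (String × String))) : List (List (String × String)) :=
  let text_lower := PySem.Str.lower case_text
  let found := (rules.foldl (fun sf r => (mmPatterns r).foldl (mmStep text_lower) sf)
      (PySem.Set.empty, PySem.Set.empty)).2
  rules.filter (fun r => (mmPatterns r).any (fun p => PySem.Set.contains found p))

-- ===== PRECONDITION & SPEC =====
def Spec_match_malpip (case_text : String) (rules : List (List (String × String))) (out : List (List (String × String))) : Prop := out = match_malpip_alt case_text rules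
instance (case_text : String) (rules : List (List (String × String))) (out : List (List (String × String))) : Decidable (Spec_match_malpip case_text rules out) := by unfold Spec_match_malpip; infer_instance

-- ===== CLAIM (what is proved, stated in full; the proofs are below) =====
def Claim_equal_match_malpip : Prop := ∀ (case_text : String) (rules : List (List (String × String))), Dom_match_malpip case_text rules → Spec_match_malpip case_text rules (match_malpip case_text rules)

-- ===== LEMMAS AND PROOFS =====

-- invariant of B's scanning loop: `found` is exactly the part of `seen` occurring in the text,
-- and after processing ps, `seen` has gained exactly the members of ps
theorem mmStep_foldl_inv (text : String) (ps : List String)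
    (sf : PySem.Set String × PySem.Set String)
    (h : ∀ q, q ∈ sf.2 ↔ q ∈ sf.1 ∧ PySem.Str.isIn q text = true) :
    (∀ q, q ∈ (ps.foldl (mmStep text) sf).2 ↔
        q ∈ (ps.foldl (mmStep text) sf).1 ∧ PySem.Str.isIn q text = true) ∧
    (∀ q, q ∈ (ps.foldl (mmStep text) sf).1 ↔ q ∈ sf.1 ∨ q ∈ ps) := by
  induction ps generalizing sf with
  | nil => exact ⟨h, fun q => by simp⟩
  | cons p ps ih =>
    simp only [List.foldl_cons]
    have hstep : ∀ q, q ∈ (mmStep text sf p).2 ↔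
        q ∈ (mmStep text sf p).1 ∧ PySem.Str.isIn q text = true := by
      intro q
      unfold mmStep
      by_cases hm : p ∈ sf.1
      · rw [if_pos ((PySem.Set.contains_iff sf.1 p).mpr hm)]
        exact h q
      · rw [if_neg (fun hh => hm ((PySem.Set.contains_iff sf.1 p).mp hh))]
        by_cases hin : PySem.Str.isIn p text = true
        · rw [if_pos hin]
          show q ∈ PySem.Set.add sf.2 p ↔ q ∈ PySem.Set.add sf.1 p ∧ _
          rw [PySem.Set.mem_add, PySem.Set.mem_add, h q]
          constructor
          · rintro (⟨ha, hb⟩ | rfl)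
            · exact ⟨Or.inl ha, hb⟩
            · exact ⟨Or.inr rfl, hin⟩
          · rintro ⟨ha | rfl, hb⟩
            · exact Or.inl ⟨ha, hb⟩
            · exact Or.inr rfl
        · rw [if_neg hin]
          show q ∈ sf.2 ↔ q ∈ PySem.Set.add sf.1 p ∧ _
          rw [PySem.Set.mem_add, h q]
          constructor
          · rintro ⟨ha, hb⟩
            exact ⟨Or.inl ha, hb⟩
          · rintro ⟨ha | rfl, hb⟩
            · exact ⟨ha, hb⟩
            · exact absurd hb hin
    have hseen : ∀ q, q ∈ (mmStep text sf p).1 ↔ q ∈ sf.1 ∨ q = p := by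
      intro q
      unfold mmStep
      by_cases hm : p ∈ sf.1
      · rw [if_pos ((PySem.Set.contains_iff sf.1 p).mpr hm)]
        constructor
        · exact Or.inl
        · rintro (hq | rfl); exacts [hq, hm]
      · rw [if_neg (fun hh => hm ((PySem.Set.contains_iff sf.1 p).mp hh))]
        exact PySem.Set.mem_add sf.1 p q
    obtain ⟨h1, h2⟩ := ih (mmStep text sf p) hstep
    refine ⟨h1, fun q => ?_⟩
    rw [h2 q, hseen q, List.mem_cons]
    tauto

-- A's per-rule test equals "some pattern of the rule occurs in the text"
theorem cond_eq_any_patterns (text : String) (r : List (String × String)) :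
    (PySem.Str.isIn (PySem.Str.lower (PySem.Dict.getD (PySem.Dict.mk r) "drug_class" "")) text ||
      ((PySem.Str.split? (PySem.Str.lower (PySem.Dict.getD (PySem.Dict.mk r) "example_drugs" "")) ",").getD []).any
        (fun d => PySem.Str.isIn (PySem.Str.strip d) text)) =
    (mmPatterns r).any (fun p => PySem.Str.isIn p text) := by
  simp [mmPatterns, List.any_cons, List.any_map, Function.comp_def]

-- membership in B's final `found` set
theorem mem_found (text : String) (rules : List (List (String × String))) (q : String) :
    q ∈ (rules.foldl (fun sf r => (mmPatterns r).foldl (mmStep text) sf)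
        (PySem.Set.empty, PySem.Set.empty)).2 ↔
      q ∈ rules.flatMap mmPatterns ∧ PySem.Str.isIn q text = true := by
  rw [← List.foldl_flatMap]
  have h := mmStep_foldl_inv text (rules.flatMap mmPatterns)
      (PySem.Set.empty, PySem.Set.empty) (by intro q; simp [PySem.Set.empty])
  rw [h.1 q, h.2 q]
  simp [PySem.Set.empty]

-- ===== VERDICT (by name: the statement is the Claim_ definition above) =====
theorem match_malpip_spec : Claim_equal_match_malpip := by
  intro case_text rules _
  unfold Spec_match_malpip match_malpip match_malpip_alt
  set text := PySem.Str.lower case_text with htext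
  rw [PySem.List.foldl_append_if_eq_filter
      (fun r => PySem.Str.isIn (PySem.Str.lower (PySem.Dict.getD (PySem.Dict.mk r) "drug_class" "")) text ||
        ((PySem.Str.split? (PySem.Str.lower (PySem.Dict.getD (PySem.Dict.mk r) "example_drugs" "")) ",").getD []).any
          (fun d => PySem.Str.isIn (PySem.Str.strip d) text)) rules []]
  rw [List.nil_append]
  apply List.filter_congr
  intro r hr
  rw [cond_eq_any_patterns]
  apply PySem.List.any_congr_mem
  intro p hp
  have hmem : p ∈ rules.flatMap mmPatterns := List.mem_flatMap.mpr ⟨r, hr, hp⟩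
  by_cases hin : PySem.Str.isIn p text = true
  · rw [hin]
    exact ((PySem.Set.contains_iff _ p).mpr ((mem_found text rules p).mpr ⟨hmem, hin⟩)).symm
  · rw [Bool.eq_false_iff.mpr hin]
    symm
    rw [Bool.eq_false_iff]
    intro hc
    exact hin ((mem_found text rules p).mp ((PySem.Set.contains_iff _ p).mp hc)).2
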